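-- pv_equiv track=rewrite | github.com/oro-computer/website | runtime/tools/build-llms-txt.py | normalize_generated_line
-- ===== SOURCE A (Python) =====
-- def normalize_generated_line(text: str) -> str:
--     """
--     Normalize only the *header* Generated timestamp so we can avoid rewriting
--     llms.txt when content is unchanged.
--     """
--
--     lines = text.splitlines()
--     out: list[str] = []
--     in_header = True
--     replaced = False
--
--     for line in lines:
--         if in_header and not replaced and line.startswith("Generated: "):
--             out.append("Generated: <preserved>")
--             replaced = True
--             continue
--         out.append(line)
--         if line.strip() == "How to link:":
--             in_header = False
--
--     return "\n".join(out).rstrip() + "\n"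
-- ===== SOURCE B (Python) =====
-- def normalize_generated_line(text: str) -> str:
--     """Find the header boundary first, then do one targeted replacement."""
--     lines = text.splitlines()
--     boundary = next((i for i, line in enumerate(lines)
--                      if line.strip() == "How to link:"), len(lines))
--     for i in range(boundary):
--         if lines[i].startswith("Generated: "):
--             lines[i] = "Generated: <preserved>"
--             break
--     return "\n".join(lines).rstrip() + "\n"
-- ===== Notes on version B (the rewrite author's own statement) =====
-- stated objective: alternative
-- what changed: Replaces A's single flag-threaded pass (in_header/replaced booleans mutated while copying every line into an output list) by a two-phase 'find the header boundary index, then one targeted in-place replacement of the first Generated: line before it' structure.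
import Mathlib
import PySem

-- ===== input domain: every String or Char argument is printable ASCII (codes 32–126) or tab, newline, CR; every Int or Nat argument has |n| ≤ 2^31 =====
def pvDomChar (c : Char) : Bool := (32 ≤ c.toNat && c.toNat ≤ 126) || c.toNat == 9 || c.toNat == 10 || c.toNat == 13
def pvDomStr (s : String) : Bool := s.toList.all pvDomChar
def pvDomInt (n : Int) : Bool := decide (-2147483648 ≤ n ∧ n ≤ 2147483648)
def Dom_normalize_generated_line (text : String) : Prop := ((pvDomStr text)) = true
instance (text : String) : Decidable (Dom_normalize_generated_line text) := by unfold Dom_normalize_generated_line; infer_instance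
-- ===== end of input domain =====

-- B restructures A's single flag-threaded pass as: find the header boundary, then one targeted replacement (alternative decomposition; same cost).

-- ===== PORT A =====
-- A's loop body: state is (out, in_header, replaced)
def pvStepA (st : List String × Bool × Bool) (line : String) : List String × Bool × Bool :=
  if st.2.1 && !st.2.2 && PySem.Str.startswith line "Generated: " then
    (st.1 ++ ["Generated: <preserved>"], st.2.1, true)
  else
    (st.1 ++ [line], (if PySem.Str.strip line == "How to link:" then false else st.2.1), st.2.2)

def normalize_generated_line (text : String) : String :=
  let lines := PySem.Str.splitlines text
  let st := lines.foldl pvStepA ([], true, false)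
  PySem.Str.rstrip (PySem.Str.join "\n" st.1) ++ "\n"

-- ===== PORT B =====
-- index of the first line whose stripped value is "How to link:", else the length
def pvBoundary (lines : List String) : Nat :=
  match lines.findIdx? (fun l => PySem.Str.strip l == "How to link:") with
  | some i => i
  | none => lines.length

-- replace the first "Generated: "-prefixed line among the first n lines
def pvReplaceGen : List String → Nat → List String
  | [], _ => []
  | ls, 0 => ls
  | l :: ls, n+1 =>
    if PySem.Str.startswith l "Generated: " then "Generated: <preserved>" :: ls
    else l :: pvReplaceGen ls n

def normalize_generated_line_alt (text : String) : String :=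
  let lines := PySem.Str.splitlines text
  let lines := pvReplaceGen lines (pvBoundary lines)
  PySem.Str.rstrip (PySem.Str.join "\n" lines) ++ "\n"

-- ===== PRECONDITION & SPEC =====
def Spec_normalize_generated_line (text : String) (out : String) : Prop := out = normalize_generated_line_alt text
instance (text : String) (out : String) : Decidable (Spec_normalize_generated_line text out) := by unfold Spec_normalize_generated_line; infer_instance

-- ===== CLAIM (what is proved, stated in full; the proofs are below) =====
def Claim_equal_normalize_generated_line : Prop := ∀ (text : String), Dom_normalize_generated_line text → Spec_normalize_generated_line text (normalize_generated_line text)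

-- ===== LEMMAS AND PROOFS =====

-- A's loop, restated as structural recursion producing only the output list
def pvLoopA : List String → Bool → Bool → List String
  | [], _, _ => []
  | l :: ls, inh, rep =>
    if inh && !rep && PySem.Str.startswith l "Generated: " then
      "Generated: <preserved>" :: pvLoopA ls inh true
    else
      l :: pvLoopA ls (if PySem.Str.strip l == "How to link:" then false else inh) rep

theorem pvLoopA_done (ls : List String) (inh rep : Bool) (h : inh = false ∨ rep = true) :
    pvLoopA ls inh rep = ls := by
  induction ls generalizing inh rep with
  | nil => rfl
  | cons l ls ih =>
    rcases h with h | h <;> subst h <;> simp [pvLoopA]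
    · exact ih _ _ (Or.inl (by simp))
    · exact ih _ _ (Or.inr rfl)

theorem pv_strip_of_gen (l : String) (h : "Generated: ".toList <+: l.toList) :
    PySem.Str.strip l ≠ "How to link:" := by
  intro heq
  obtain ⟨t, ht⟩ := h
  have hlist : PySem.Chars.strip l.toList = "How to link:".toList := by
    have := congrArg String.toList heq
    simpa [PySem.Str.strip] using this
  have hG : ("Generated: ".toList ++ t) = 'G' :: ("enerated: ".toList ++ t) := by rfl
  rw [← ht, hG] at hlist
  unfold PySem.Chars.strip PySem.Chars.lstrip PySem.Chars.rstrip at hlist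
  have hGns : PySem.Chars.isspace 'G' = false := by decide
  rw [List.dropWhile_cons_of_neg (by simp [hGns])] at hlist
  set cs := "enerated: ".toList ++ t with hcs
  have hrev : ('G' :: cs).reverse = cs.reverse ++ ['G'] := by simp
  rw [hrev] at hlist
  set d := List.dropWhile PySem.Chars.isspace (cs.reverse ++ ['G']) with hd
  have hdne : d ≠ [] := by
    intro h0
    have hall := List.dropWhile_eq_nil_iff.mp (hd ▸ h0)
    have := hall 'G' (by simp)
    simp [hGns] at this
  obtain ⟨pre, hp⟩ := List.dropWhile_suffix (l := cs.reverse ++ ['G']) (p := PySem.Chars.isspace)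
  have hsome : d.getLast?.isSome := List.getLast?_isSome.mpr hdne
  have h1 : (pre ++ d).getLast? = some 'G' := by rw [hp]; exact List.getLast?_concat
  rw [List.getLast?_append, Option.or_of_isSome hsome] at h1
  have hhead : d.reverse.head? = some 'G' := by rw [List.head?_reverse]; exact h1
  rw [hlist] at hhead
  simp at hhead

theorem pvLoopA_eq_replace (ls : List String) :
    pvLoopA ls true false = pvReplaceGen ls (pvBoundary ls) := by
  induction ls with
  | nil => rfl
  | cons l ls ih =>
    by_cases hg : PySem.Str.startswith l "Generated: " = true
    · have hs : ¬ PySem.Str.strip l = "How to link:" := by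
        apply pv_strip_of_gen
        exact (PySem.Chars.startswith_iff _ _).mp (by simpa using hg)
      have hb : pvBoundary (l :: ls) = pvBoundary ls + 1 := by
        unfold pvBoundary
        rw [List.findIdx?_cons]
        rw [if_neg (by simp [hs])]
        cases h : ls.findIdx? (fun l => PySem.Str.strip l == "How to link:") <;> simp
      rw [hb]
      simp only [PySem.Str.startswith_eq] at hg
      simp at hg
      simp [pvLoopA, pvReplaceGen, hg, pvLoopA_done ls true true (Or.inr rfl)]
    · have hg' : PySem.Str.startswith l "Generated: " = false := by simpa using hg
      simp only [PySem.Str.startswith_eq] at hg'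
      simp at hg'
      by_cases hs : PySem.Str.strip l = "How to link:"
      · have hb : pvBoundary (l :: ls) = 0 := by
          unfold pvBoundary
          rw [List.findIdx?_cons, if_pos (by simp [hs])]
        rw [hb]
        simp [pvLoopA, pvReplaceGen, hg', hs, pvLoopA_done ls false false (Or.inl rfl)]
      · have hb : pvBoundary (l :: ls) = pvBoundary ls + 1 := by
          unfold pvBoundary
          rw [List.findIdx?_cons, if_neg (by simp [hs])]
          cases h : ls.findIdx? (fun l => PySem.Str.strip l == "How to link:") <;> simp
        rw [hb]
        simp [pvLoopA, pvReplaceGen, hg', hs, ih]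

theorem pvFoldA_eq (ls : List String) (out : List String) (inh rep : Bool) :
    (ls.foldl pvStepA (out, inh, rep)).1 = out ++ pvLoopA ls inh rep := by
  induction ls generalizing out inh rep with
  | nil => simp [pvLoopA]
  | cons l ls ih =>
    simp only [List.foldl_cons, pvStepA, pvLoopA]
    split
    · rw [ih]; simp
    · rw [ih]; simp

-- ===== VERDICT (by name: the statement is the Claim_ definition above) =====
theorem normalize_generated_line_spec : Claim_equal_normalize_generated_line := by
  intro text _
  unfold Spec_normalize_generated_line normalize_generated_line normalize_generated_line_alt
  simp only [pvFoldA_eq, pvLoopA_eq_replace, List.nil_append]
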